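-- pv_equiv track=rewrite | github.com/whispr-dev/ulam-prime-spiral-3d | src/ulam-3d-wow.py | cubic_shell_points
-- ===== SOURCE A (Python) =====
-- from typing import Dict, Iterable, List, Tuple, Optional, Set
--
-- Vec3 = Tuple[int, int, int]
--
-- def cubic_shell_points(r: int) -> Iterable[Vec3]:
--     """Points on surface max(|x|,|y|,|z|)=r, lexicographic order."""
--     if r == 0:
--         yield (0, 0, 0)
--         return
--     rng = range(-r, r + 1)
--     for x in rng:
--         for y in rng:
--             for z in rng:
--                 if max(abs(x), abs(y), abs(z)) == r:
--                     yield (x, y, z)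
-- ===== SOURCE B (Python) =====
-- def cubic_shell_points(r: int):
--     """Points on surface max(|x|,|y|,|z|)=r, lexicographic order.
--
--     Staged construction: precompute one full face cross-section and one
--     ring cross-section once, then emit face / (2r-1) rings / face.
--     """
--     if r == 0:
--         yield (0, 0, 0)
--         return
--     rng = range(-r, r + 1)
--     full = [(y, z) for y in rng for z in rng]
--     ring = [(-r, z) for z in rng]
--     for y in range(-r + 1, r):
--         ring.append((y, -r))
--         ring.append((y, r))
--     ring += [(r, z) for z in rng]
--     for y, z in full:
--         yield (-r, y, z)
--     for x in range(-r + 1, r):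
--         for y, z in ring:
--             yield (x, y, z)
--     for y, z in full:
--         yield (r, y, z)
-- ===== Notes on version B (the rewrite author's own statement) =====
-- stated objective: alternative
-- what changed: Instead of filtering all (2r+1)^3 grid points with max(|x|,|y|,|z|)==r, B precomputes one full face cross-section and one ring cross-section once and emits them staged as face / (2r-1) rings / face by concatenation (O(r^2) points generated with O(1) work each, vs O(r^3) tests).
import Mathlib
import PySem

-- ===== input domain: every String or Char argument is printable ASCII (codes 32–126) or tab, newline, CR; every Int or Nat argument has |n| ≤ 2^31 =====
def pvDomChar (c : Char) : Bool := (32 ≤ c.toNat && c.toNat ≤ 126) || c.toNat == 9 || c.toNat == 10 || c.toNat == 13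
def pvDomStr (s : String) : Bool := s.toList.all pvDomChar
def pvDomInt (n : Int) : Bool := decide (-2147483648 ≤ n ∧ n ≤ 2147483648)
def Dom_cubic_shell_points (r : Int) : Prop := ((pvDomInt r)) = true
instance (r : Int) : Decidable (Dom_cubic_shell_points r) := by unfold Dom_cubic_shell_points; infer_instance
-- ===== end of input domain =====

-- B builds the shell by staged concatenation (one precomputed full face
-- cross-section, one precomputed ring cross-section, emitted as face /
-- 2r-1 rings / face) instead of filtering the whole (2r+1)^3 cube; same
-- yielded sequence. (The Python versions are generators; equivalence is
-- about the yielded sequence.)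

-- ===== PORT A =====
-- literal transliteration: triple nested loop over range(-r, r+1), filtering
-- on max(abs x, abs y, abs z) == r (yield becomes a singleton in a flatMap)
def cubic_shell_points (r : Int) : List (Int × Int × Int) :=
  if r = 0 then [(0, 0, 0)]
  else
    let rng := PySem.List.pyRange (-r) (r + 1) 1
    rng.flatMap (fun x =>
      rng.flatMap (fun y =>
        rng.flatMap (fun z =>
          if max (max |x| |y|) |z| = r then [(x, y, z)] else [])))

-- ===== PORT B =====
-- staged: full face list, ring list (built by append as in Source B), then
-- face ++ rings ++ face
def cubic_shell_points_alt (r : Int) : List (Int × Int × Int) :=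
  if r = 0 then [(0, 0, 0)]
  else
    let rng := PySem.List.pyRange (-r) (r + 1) 1
    let mid := PySem.List.pyRange (-r + 1) r 1
    let full : List (Int × Int) := rng.flatMap (fun y => rng.map (fun z => (y, z)))
    let ring : List (Int × Int) :=
      (rng.map (fun z => (-r, z))
        ++ mid.flatMap (fun y => [(y, -r), (y, r)]))
        ++ rng.map (fun z => (r, z))
    (full.map (fun p => (-r, p.1, p.2))
      ++ mid.flatMap (fun x => ring.map (fun p => (x, p.1, p.2))))
      ++ full.map (fun p => (r, p.1, p.2))

-- ===== PRECONDITION & SPEC =====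
def Spec_cubic_shell_points (r : Int) (out : List (Int × Int × Int)) : Prop := out = cubic_shell_points_alt r
instance (r : Int) (out : List (Int × Int × Int)) : Decidable (Spec_cubic_shell_points r out) := by unfold Spec_cubic_shell_points; infer_instance

-- ===== CLAIM (what is proved, stated in full; the proofs are below) =====
def Claim_equal_cubic_shell_points : Prop := ∀ (r : Int), Dom_cubic_shell_points r → Spec_cubic_shell_points r (cubic_shell_points r)

-- ===== LEMMAS AND PROOFS =====

-- flatMap congruence on members
theorem pv_flatMap_congr {α β : Type} {l : List α} {f g : α → List β}
    (h : ∀ a ∈ l, f a = g a) : l.flatMap f = l.flatMap g := by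
  induction l with
  | nil => rfl
  | cons a t ih =>
    simp only [List.flatMap_cons]
    rw [h a (by simp), ih (fun b hb => h b (by simp [hb]))]


-- split a flatMap over range(-r, r+1) into first / middle / last element
theorem pv_split {β : Type} (r : Int) (hr : 0 < r) (f : Int → List β) :
    (PySem.List.pyRange (-r) (r + 1) 1).flatMap f =
    (f (-r) ++ (PySem.List.pyRange (-r + 1) r 1).flatMap f) ++ f r := by
  rw [PySem.List.pyRange_one_cons (a := -r) (by omega),
      PySem.List.pyRange_one_succ_right (a := -r + 1) (b := r) (by omega),
      List.flatMap_cons, List.flatMap_append]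
  simp [List.append_assoc]

-- inner z-loop when the column (x,y) already touches the boundary:
-- every z in the range passes the filter
theorem pv_col_full (r x y : Int) (hxy : max |x| |y| = r) :
    (PySem.List.pyRange (-r) (r + 1) 1).flatMap
      (fun z => if max (max |x| |y|) |z| = r then [(x, y, z)] else []) =
    (PySem.List.pyRange (-r) (r + 1) 1).map (fun z => (x, y, z)) := by
  rw [pv_flatMap_congr (g := fun z => [(x, y, z)]) ?_]
  · exact List.flatMap_pure_eq_map _ _
  · intro z hz
    rw [PySem.List.mem_pyRange_one] at hz
    have hzr : |z| ≤ r := abs_le.mpr ⟨hz.1, by omega⟩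
    rw [hxy, if_pos (by omega)]

-- inner z-loop for an interior column: only z = -r and z = r pass
theorem pv_col_caps (r x y : Int) (hr : 0 < r) (hxy : max |x| |y| < r) :
    (PySem.List.pyRange (-r) (r + 1) 1).flatMap
      (fun z => if max (max |x| |y|) |z| = r then [(x, y, z)] else []) =
    [(x, y, -r), (x, y, r)] := by
  rw [PySem.List.pyRange_one_cons (by omega),
      PySem.List.pyRange_one_succ_right (by omega)]
  simp only [List.flatMap_cons, List.flatMap_append, List.flatMap_nil]
  have h1 : max (max |x| |y|) |(-r)| = r := by
    rw [abs_neg, abs_of_pos hr]; omega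
  have h2 : max (max |x| |y|) |r| = r := by
    rw [abs_of_pos hr]; omega
  rw [if_pos h1, if_pos h2,
      pv_flatMap_congr (g := fun _ => ([] : List (Int × Int × Int))) ?_]
  · simp
  · intro z hz
    rw [PySem.List.mem_pyRange_one] at hz
    have : |z| < r := abs_lt.mpr ⟨by omega, by omega⟩
    rw [if_neg (by omega)]

-- a face slice x = ±r of A equals the mapped full face of B
theorem pv_face (r x : Int) (hx : |x| = r) :
    (PySem.List.pyRange (-r) (r + 1) 1).flatMap
      (fun y => (PySem.List.pyRange (-r) (r + 1) 1).flatMap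
        (fun z => if max (max |x| |y|) |z| = r then [(x, y, z)] else [])) =
    ((PySem.List.pyRange (-r) (r + 1) 1).flatMap
      (fun y => (PySem.List.pyRange (-r) (r + 1) 1).map (fun z => (y, z)))).map
      (fun p => (x, p.1, p.2)) := by
  rw [List.map_flatMap]
  apply pv_flatMap_congr
  intro y hy
  rw [PySem.List.mem_pyRange_one] at hy
  have hyr : |y| ≤ r := abs_le.mpr ⟨hy.1, by omega⟩
  rw [pv_col_full r x y (by omega), List.map_map]
  rfl

-- a middle slice |x| < r of A equals the mapped ring of B
theorem pv_ring (r x : Int) (hr : 0 < r) (hx : |x| < r) :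
    (PySem.List.pyRange (-r) (r + 1) 1).flatMap
      (fun y => (PySem.List.pyRange (-r) (r + 1) 1).flatMap
        (fun z => if max (max |x| |y|) |z| = r then [(x, y, z)] else [])) =
    (((PySem.List.pyRange (-r) (r + 1) 1).map (fun z => ((-r : Int), z))
        ++ (PySem.List.pyRange (-r + 1) r 1).flatMap (fun y => [(y, -r), (y, r)]))
        ++ (PySem.List.pyRange (-r) (r + 1) 1).map (fun z => (r, z))).map
      (fun p => (x, p.1, p.2)) := by
  rw [pv_split r hr, List.map_append, List.map_append]
  congr 1
  · congr 1
    · -- y = -r row: full z column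
      rw [pv_col_full r x (-r) (by rw [abs_neg, abs_of_pos hr]; omega),
          List.map_map]
      rfl
    · -- interior rows: two caps each
      rw [List.map_flatMap]
      apply pv_flatMap_congr
      intro y hy
      rw [PySem.List.mem_pyRange_one] at hy
      have hyr : |y| < r := abs_lt.mpr (by constructor <;> omega)
      rw [pv_col_caps r x y hr (by omega)]
      rfl
  · -- y = r row: full z column
    rw [pv_col_full r x r (by rw [abs_of_pos hr]; omega), List.map_map]
    rfl

-- ===== VERDICT (by name: the statement is the Claim_ definition above) =====
theorem cubic_shell_points_spec : Claim_equal_cubic_shell_points := by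
  intro r _
  unfold Spec_cubic_shell_points cubic_shell_points cubic_shell_points_alt
  by_cases h0 : r = 0
  · simp [h0]
  · rw [if_neg h0, if_neg h0]
    by_cases hr : r < 0
    · rw [PySem.List.pyRange_one_eq_nil (by omega),
          PySem.List.pyRange_one_eq_nil (a := -r + 1) (by omega)]
      rfl
    · have hr' : 0 < r := by omega
      rw [pv_split r hr']
      congr 1
      · congr 1
        · exact pv_face r (-r) (by rw [abs_neg, abs_of_pos hr'])
        · apply pv_flatMap_congr
          intro x hx
          rw [PySem.List.mem_pyRange_one] at hx
          exact pv_ring r x hr' (abs_lt.mpr (by constructor <;> omega))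
      · exact pv_face r r (abs_of_pos hr')
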